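-- pv_equiv track=rewrite | github.com/ujpisgod/baekjoon | Python3/프로그래머스/3/12987. 숫자 게임/숫자 게임.py | solution
-- ===== SOURCE A (Python) =====
-- def solution(A, B):
--     from collections import Counter
--     from bisect import bisect_right
--     b=max(B)
--     nb=set(B)
--     nB=sorted(list(nb))
--     answer = 0
--     pr=list(range(len(nB)+1))
--     cnt=Counter(B)
--     def find(x):
--         while pr[x]!=x:
--             pr[x]=pr[pr[x]]
--             x=pr[x]
--         return x
--     def union(a,b):
--         aa=find(a)
--         bb=find(b)
--         if bb<aa:
--             pr[bb]=aa
--         elif aa<bb: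
--             pr[aa]=bb
--     sc=0
--     for i in A:
--         if i<= b:
--             c=bisect_right(nB,i)
--             x=find(c)
--             if x==len(nB):
--                 continue
--             if cnt.get(nB[x],0)>=1:
--                 cnt[nB[x]]-=1
--                 sc+=1
--                 if cnt.get(nB[x],0)==0 and i!=b:
--                     union(x,x+1)
--     answer=sc
--     return answer
-- ===== SOURCE B (Python) =====
-- def solution(A, B):
--     from bisect import bisect_right
--     # Simple greedy: keep B sorted ascending; for each a (in A's order),
--     # delete the smallest remaining B element strictly larger than a.
--     rem = sorted(B)
--     sc = 0
--     for a in A: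
--         k = bisect_right(rem, a)
--         if k < len(rem):
--             del rem[k]
--             sc += 1
--     return sc
-- ===== Notes on version B (the rewrite author's own statement) =====
-- stated objective: simpler
-- what changed: Replaced the Counter/set/union-find 'next available larger value' machinery with a plain greedy over a sorted copy of B: for each a, bisect for the smallest remaining element > a and delete it.
import Mathlib
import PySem

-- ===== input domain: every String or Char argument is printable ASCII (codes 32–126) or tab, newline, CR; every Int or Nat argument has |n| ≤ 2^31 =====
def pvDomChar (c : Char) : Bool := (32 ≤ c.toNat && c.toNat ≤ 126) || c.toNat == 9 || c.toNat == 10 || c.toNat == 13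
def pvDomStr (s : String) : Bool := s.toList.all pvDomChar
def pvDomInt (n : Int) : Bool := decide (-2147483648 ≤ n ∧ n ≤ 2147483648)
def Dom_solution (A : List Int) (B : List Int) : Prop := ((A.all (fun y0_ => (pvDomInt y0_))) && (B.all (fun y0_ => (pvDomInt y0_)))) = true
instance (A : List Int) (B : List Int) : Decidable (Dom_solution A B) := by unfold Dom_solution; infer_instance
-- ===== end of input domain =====

-- B replaces A's Counter/set/bisect/union-find search for the next available larger B value
-- with a plain greedy over a sorted copy of B (simpler; equivalence of return values proved below).

-- ===== PORT A =====
-- the inner 'find' with path compression: while pr[x]!=x: pr[x]=pr[pr[x]]; x=pr[x]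
-- (the while loop is ported with fuel = len(pr), shown sufficient in the proofs below)
def pyFindA (fuel : Nat) (pr : List Int) (x : Int) : List Int × Int :=
  match fuel with
  | 0 => (pr, x)
  | f + 1 =>
    let px := PySem.List.pyGetD pr x 0
    if px = x then (pr, x)
    else
      let ppx := PySem.List.pyGetD pr px 0
      pyFindA f (PySem.List.pySetD pr x ppx) ppx

-- the inner 'union'
def pyUnionA (pr : List Int) (a b : Int) : List Int :=
  let r1 := pyFindA pr.length pr a
  let r2 := pyFindA r1.1.length r1.1 b
  let aa := r1.2
  let bb := r2.2
  if bb < aa then PySem.List.pySetD r2.1 bb aa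
  else if aa < bb then PySem.List.pySetD r2.1 aa bb
  else r2.1

-- the body of 'for i in A: …' (state: pr, cnt, sc)
def loopA (b : Int) (nB : List Int) (st : List Int × PySem.Dict Int Int × Int) (i : Int) :
    List Int × PySem.Dict Int Int × Int :=
  let pr := st.1; let cnt := st.2.1; let sc := st.2.2
  if i ≤ b then
    let c := PySem.List.bisectRight nB i
    let fr := pyFindA pr.length pr (c : Int)
    let pr1 := fr.1; let x := fr.2
    if x = (nB.length : Int) then (pr1, cnt, sc)
    else
      let v := PySem.List.pyGetD nB x 0
      if 1 ≤ cnt.getD v 0 then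
        let cnt1 := cnt.modify v 0 (· - 1)
        let sc1 := sc + 1
        if cnt1.getD v 0 = 0 ∧ i ≠ b then (pyUnionA pr1 x (x + 1), cnt1, sc1)
        else (pr1, cnt1, sc1)
      else (pr1, cnt, sc)
  else (pr, cnt, sc)

def solution (A : List Int) (B : List Int) : Int :=
  match PySem.List.max? B (fun y => y) with
  | none => 0   -- Python: max([]) raises ValueError; excluded by Pre_solution
  | some b =>
    let nB := PySem.List.sorted (PySem.Set.ofList B) (fun y => y)
    let pr0 := PySem.List.pyRange 0 ((nB.length : Int) + 1) 1
    let cnt0 := PySem.Dict.counter B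
    (A.foldl (loopA b nB) (pr0, cnt0, 0)).2.2

-- ===== PORT B =====
-- the body of 'for a in A: …' (state: rem, sc): k = bisect_right(rem, a); if k < len(rem): del rem[k]; sc += 1
def stepB (st : List Int × Int) (a : Int) : List Int × Int :=
  let k := PySem.List.bisectRight st.1 a
  if k < st.1.length then (st.1.eraseIdx k, st.2 + 1)
  else st

def solution_alt (A : List Int) (B : List Int) : Int :=
  (A.foldl stepB (PySem.List.sorted B (fun y => y), 0)).2

-- ===== PRECONDITION & SPEC =====
-- Pre_ excludes exactly B = [], where Python's max(B) raises ValueError.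
def Pre_solution (A : List Int) (B : List Int) : Prop := B ≠ []
instance (A : List Int) (B : List Int) : Decidable (Pre_solution A B) := by unfold Pre_solution; infer_instance
def pvWitness_solution : List Int × List Int := ([1, 3, 2], [2, 2, 5])

def Spec_solution (A : List Int) (B : List Int) (out : Int) : Prop := out = solution_alt A B
instance (A : List Int) (B : List Int) (out : Int) : Decidable (Spec_solution A B out) := by unfold Spec_solution; infer_instance

-- ===== CLAIM (what is proved, stated in full; the proofs are below) =====
def Claim_equal_solution : Prop := ∀ (A : List Int) (B : List Int), Dom_solution A B → Pre_solution A B → Spec_solution A B (solution A B)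

-- ===== LEMMAS AND PROOFS =====

-- entry i of the parent list
def entP (pr : List Int) (i : Nat) : Int := PySem.List.pyGetD pr (i : Int) 0

-- index j of nB holds a value with remaining multiplicity ≥ 1
def availN (nB : List Int) (cnt : PySem.Dict Int Int) (j : Nat) : Prop :=
  1 ≤ cnt.getD (nB.getD j 0) 0

-- number of leading values of vs with multiplicity 0
def firstSkip (cnt : PySem.Dict Int Int) : List Int → Nat
  | [] => 0
  | v :: t => if 1 ≤ cnt.getD v 0 then 0 else firstSkip cnt t + 1

-- smallest j ≥ c with j = nB.length or availN nB cnt j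
def firstAvail (nB : List Int) (cnt : PySem.Dict Int Int) (c : Nat) : Nat :=
  c + firstSkip cnt (nB.drop c)

-- the union-find invariant: every parent pointer jumps forward over unavailable indices only,
-- and every root below nB.length is available
def goodPr (nB : List Int) (cnt : PySem.Dict Int Int) (pr : List Int) : Prop :=
  pr.length = nB.length + 1 ∧
  ∀ i : Nat, i ≤ nB.length →
    ∃ p : Nat, entP pr i = (p : Int) ∧ i ≤ p ∧ p ≤ nB.length ∧
      (∀ j, i ≤ j → j < p → ¬ availN nB cnt j) ∧
      (p = i → (i = nB.length ∨ availN nB cnt i))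

-- the multiset of remaining B values, as a sorted list
def expandV (vs : List Int) (cnt : PySem.Dict Int Int) : List Int :=
  vs.flatMap (fun v => List.replicate (cnt.getD v 0).toNat v)

lemma firstSkip_le (cnt : PySem.Dict Int Int) (vs : List Int) : firstSkip cnt vs ≤ vs.length := by
  induction vs with
  | nil => simp [firstSkip]
  | cons v t ih =>
    simp only [firstSkip]
    split
    · simp
    · simp; omega

lemma firstSkip_cons (cnt : PySem.Dict Int Int) (v : Int) (t : List Int) :
    firstSkip cnt (v :: t) = if 1 ≤ cnt.getD v 0 then 0 else firstSkip cnt t + 1 := rfl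

lemma firstSkip_spec1 (cnt : PySem.Dict Int Int) (vs : List Int) :
    ∀ i < firstSkip cnt vs, ¬ 1 ≤ cnt.getD (vs.getD i 0) 0 := by
  induction vs with
  | nil => simp [firstSkip]
  | cons v t ih =>
    intro i hi
    simp only [firstSkip] at hi
    split at hi
    · omega
    · cases i with
      | zero => simpa using ‹¬ 1 ≤ cnt.getD v 0›
      | succ k => exact ih k (by omega)

lemma firstSkip_spec2 (cnt : PySem.Dict Int Int) (vs : List Int)
    (h : firstSkip cnt vs < vs.length) : 1 ≤ cnt.getD (vs.getD (firstSkip cnt vs) 0) 0 := by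
  induction vs with
  | nil => simp at h
  | cons v t ih =>
    by_cases hv : 1 ≤ cnt.getD v 0
    · simp [firstSkip, hv]
    · simp only [firstSkip, if_neg hv] at h ⊢
      have ht : firstSkip cnt t < t.length := by simp at h; omega
      simpa using ih ht

lemma getD_drop (vs : List Int) (c j : Nat) : (vs.drop c).getD j 0 = vs.getD (c + j) 0 := by
  simp [List.getD, List.getElem?_drop]

lemma firstAvail_le (nB : List Int) (cnt : PySem.Dict Int Int) (c : Nat) (hc : c ≤ nB.length) :
    firstAvail nB cnt c ≤ nB.length := by
  have := firstSkip_le cnt (nB.drop c)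
  simp only [firstAvail]; simp [List.length_drop] at this ⊢; omega

lemma firstAvail_spec1 (nB : List Int) (cnt : PySem.Dict Int Int) (c : Nat) :
    ∀ j, c ≤ j → j < firstAvail nB cnt c → ¬ availN nB cnt j := by
  intro j h1 h2
  have := firstSkip_spec1 cnt (nB.drop c) (j - c) (by simp only [firstAvail] at h2; omega)
  rw [getD_drop] at this
  have hj : c + (j - c) = j := by omega
  rw [hj] at this
  simpa [availN] using this

lemma firstAvail_spec2 (nB : List Int) (cnt : PySem.Dict Int Int) (c : Nat)
    (h : firstAvail nB cnt c < nB.length) : availN nB cnt (firstAvail nB cnt c) := by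
  have hlen : firstSkip cnt (nB.drop c) < (nB.drop c).length := by
    simp only [firstAvail] at h; simp [List.length_drop]; omega
  have := firstSkip_spec2 cnt (nB.drop c) hlen
  rw [getD_drop] at this
  simpa [availN, firstAvail] using this

lemma firstAvail_skip (nB : List Int) (cnt : PySem.Dict Int Int) (c m : Nat)
    (hcm : c ≤ m) (hm : m ≤ nB.length)
    (hun : ∀ j, c ≤ j → j < m → ¬ availN nB cnt j) :
    firstAvail nB cnt c = firstAvail nB cnt m := by
  induction m with
  | zero =>
    have : c = 0 := by omega
    subst this; rfl
  | succ k ih =>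
    by_cases hck : c ≤ k
    · have h1 : firstAvail nB cnt c = firstAvail nB cnt k :=
        ih hck (by omega) (fun j h1 h2 => hun j h1 (by omega))
      rw [h1]
      -- k is unavailable and k < nB.length, so firstAvail k = firstAvail (k+1)
      have hk : ¬ availN nB cnt k := hun k hck (by omega)
      have hkl : k < nB.length := by omega
      have hdrop : nB.drop k = nB.getD k 0 :: nB.drop (k + 1) := by
        rw [List.getD, List.getElem?_eq_getElem hkl]
        exact List.drop_eq_getElem_cons hkl
      unfold firstAvail
      rw [hdrop, firstSkip_cons, if_neg (by simpa [availN] using hk)]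
      omega
    · have : c = k + 1 := by omega
      subst this; rfl

lemma firstAvail_of_avail (nB : List Int) (cnt : PySem.Dict Int Int) (c : Nat)
    (hc : c < nB.length) (h : availN nB cnt c) : firstAvail nB cnt c = c := by
  have hdrop : nB.drop c = nB.getD c 0 :: nB.drop (c + 1) := by
    rw [List.getD, List.getElem?_eq_getElem hc]
    exact List.drop_eq_getElem_cons hc
  unfold firstAvail
  rw [hdrop, firstSkip_cons, if_pos (by simpa [availN] using h)]
  omega

lemma firstAvail_of_len (nB : List Int) (cnt : PySem.Dict Int Int) :
    firstAvail nB cnt nB.length = nB.length := by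
  simp [firstAvail, firstSkip]

-- evaluating find at a root does nothing
lemma find_at_root (fuel : Nat) (pr : List Int) (x : Int) (h : PySem.List.pyGetD pr x 0 = x) :
    pyFindA (fuel + 1) pr x = (pr, x) := by
  simp [pyFindA, h]

-- pyFindA computes firstAvail and preserves goodPr
lemma findSpec (nB : List Int) (cnt : PySem.Dict Int Int) :
    ∀ (fuel : Nat) (pr : List Int) (c : Nat), goodPr nB cnt pr → c ≤ nB.length →
    nB.length - c < fuel →
    goodPr nB cnt (pyFindA fuel pr (c : Int)).1 ∧
    (pyFindA fuel pr (c : Int)).1.length = pr.length ∧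
    (pyFindA fuel pr (c : Int)).2 = (firstAvail nB cnt c : Int) := by
  intro fuel
  induction fuel with
  | zero => intro pr c hg hc hf; omega
  | succ f ih =>
    intro pr c hg hc hf
    obtain ⟨p, h1, h2, h3, h4, h5⟩ := hg.2 c hc
    by_cases hpc : p = c
    · -- c is a root: the loop exits at once
      have hroot : PySem.List.pyGetD pr (c : Int) 0 = (c : Int) := by
        have := h1; rw [hpc] at this; exact this
      rw [find_at_root f pr _ hroot]
      refine ⟨hg, rfl, ?_⟩
      by_cases hcn : c = nB.length
      · subst hcn; rw [firstAvail_of_len]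
      · rcases h5 hpc with h | h
        · exact absurd h hcn
        · rw [firstAvail_of_avail nB cnt c (by omega) h]
    · -- c points to p, path compression step
      have hcp : c < p := by omega
      obtain ⟨q, g1, g2, g3, g4, g5⟩ := hg.2 p h3
      have hne : PySem.List.pyGetD pr (c : Int) 0 ≠ (c : Int) := by
        rw [show PySem.List.pyGetD pr (c : Int) 0 = entP pr c from rfl, h1]
        exact_mod_cast fun hcon => hpc (by exact_mod_cast hcon)
      have hclen : c < pr.length := by rw [hg.1]; omega
      have hstep : pyFindA (f + 1) pr (c : Int) =
          pyFindA f (PySem.List.pySetD pr (c : Int) (q : Int)) (q : Int) := by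
        simp only [pyFindA]
        rw [if_neg hne]
        rw [show PySem.List.pyGetD pr (c : Int) 0 = entP pr c from rfl, h1]
        rw [show PySem.List.pyGetD pr (p : Int) 0 = entP pr p from rfl, g1]
      have hcq : c < q := by omega
      -- the compressed list still satisfies the invariant
      have hg' : goodPr nB cnt (PySem.List.pySetD pr (c : Int) (q : Int)) := by
        refine ⟨by rw [PySem.List.length_pySetD, hg.1], fun i hi => ?_⟩
        by_cases hic : i = c
        · subst hic
          refine ⟨q, ?_, by omega, g3, fun j hj1 hj2 => ?_, fun hqi => by omega⟩
          · rw [show entP (PySem.List.pySetD pr (i : Int) (q : Int)) i =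
                PySem.List.pyGetD (PySem.List.pySetD pr (i : Int) (q : Int)) (i : Int) 0 from rfl,
              PySem.List.pyGetD_pySetD_natCast pr i i _ 0 hclen, if_pos rfl]
          · by_cases hjp : j < p
            · exact h4 j hj1 hjp
            · exact g4 j (by omega) hj2
        · obtain ⟨r, k1, k2, k3, k4, k5⟩ := hg.2 i hi
          refine ⟨r, ?_, k2, k3, k4, k5⟩
          rw [show entP (PySem.List.pySetD pr (c : Int) (q : Int)) i =
                PySem.List.pyGetD (PySem.List.pySetD pr (c : Int) (q : Int)) (i : Int) 0 from rfl,
            PySem.List.pyGetD_pySetD_natCast pr c i _ 0 hclen, if_neg hic]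
          exact k1
      have hrec := ih (PySem.List.pySetD pr (c : Int) (q : Int)) q hg' g3 (by omega)
      rw [hstep]
      refine ⟨hrec.1, by rw [hrec.2.1, PySem.List.length_pySetD], ?_⟩
      rw [hrec.2.2]
      have hskip : firstAvail nB cnt c = firstAvail nB cnt q := by
        refine firstAvail_skip nB cnt c q (by omega) g3 (fun j hj1 hj2 => ?_)
        by_cases hjp : j < p
        · exact h4 j hj1 hjp
        · exact g4 j (by omega) hj2
      rw [hskip]

-- pyUnionA restores goodPr after the decrement makes x unavailable
lemma unionSpec (nB : List Int) (cnt cnt' : PySem.Dict Int Int) (pr : List Int) (x : Nat)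
    (hg : goodPr nB cnt pr) (hx : x < nB.length) (hav : availN nB cnt x)
    (hagree : ∀ j, j < nB.length → j ≠ x → (availN nB cnt' j ↔ availN nB cnt j))
    (hx' : ¬ availN nB cnt' x) :
    goodPr nB cnt' (pyUnionA pr (x : Int) ((x : Int) + 1)) := by
  have hn1 : pr.length = nB.length + 1 := hg.1
  -- x is its own root: its invariant witness must be x itself
  have hrootx : entP pr x = (x : Int) := by
    obtain ⟨p, h1, h2, h3, h4, h5⟩ := hg.2 x (by omega)
    have hpx : p = x := by
      by_contra hne
      exact h4 x (le_refl x) (by omega) hav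
    rw [h1, hpx]
  have hfuel : ∃ m, pr.length = m + 1 := ⟨nB.length, hn1⟩
  obtain ⟨m, hm⟩ := hfuel
  have hfind1 : pyFindA pr.length pr (x : Int) = (pr, (x : Int)) := by
    rw [hm]; exact find_at_root m pr _ hrootx
  have hx1 : (x : Int) + 1 = ((x + 1 : Nat) : Int) := by push_cast; ring
  have hfind2 := findSpec nB cnt pr.length pr (x + 1) hg (by omega) (by omega)
  set pr2 := (pyFindA pr.length pr ((x + 1 : Nat) : Int)).1 with hpr2
  set r := firstAvail nB cnt (x + 1) with hr
  have hrx : x + 1 ≤ r := by simp [hr, firstAvail]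
  have hrn : r ≤ nB.length := firstAvail_le nB cnt (x + 1) (by omega)
  have hunav : ∀ j, x + 1 ≤ j → j < r → ¬ availN nB cnt j := firstAvail_spec1 nB cnt (x + 1)
  have hgoal : pyUnionA pr (x : Int) ((x : Int) + 1) = PySem.List.pySetD pr2 (x : Int) (r : Int) := by
    unfold pyUnionA
    rw [hfind1]
    simp only
    rw [hx1, hfind2.2.2]
    rw [if_neg (by exact_mod_cast by omega), if_pos (by exact_mod_cast by omega)]
  rw [hgoal]
  have hg2 : goodPr nB cnt pr2 := hfind2.1
  have hxlen2 : x < pr2.length := by rw [hfind2.2.1, hn1]; omega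
  refine ⟨by rw [PySem.List.length_pySetD, hfind2.2.1, hn1], fun i hi => ?_⟩
  by_cases hix : i = x
  · subst hix
    refine ⟨r, ?_, by omega, hrn, fun j hj1 hj2 => ?_, fun hri => by omega⟩
    · rw [show entP (PySem.List.pySetD pr2 (i : Int) (r : Int)) i =
          PySem.List.pyGetD (PySem.List.pySetD pr2 (i : Int) (r : Int)) (i : Int) 0 from rfl,
        PySem.List.pyGetD_pySetD_natCast pr2 i i _ 0 hxlen2, if_pos rfl]
    · by_cases hji : j = i
      · subst hji; exact hx'
      · intro hav'
        exact hunav j (by omega) hj2 ((hagree j (by omega) hji).mp hav')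
  · obtain ⟨p, h1, h2, h3, h4, h5⟩ := hg2.2 i hi
    refine ⟨p, ?_, h2, h3, fun j hj1 hj2 => ?_, fun hp => ?_⟩
    · rw [show entP (PySem.List.pySetD pr2 (x : Int) (r : Int)) i =
          PySem.List.pyGetD (PySem.List.pySetD pr2 (x : Int) (r : Int)) (i : Int) 0 from rfl,
        PySem.List.pyGetD_pySetD_natCast pr2 x i _ 0 hxlen2, if_neg hix]
      exact h1
    · by_cases hjx : j = x
      · subst hjx; exact hx'
      · intro hav'
        exact h4 j hj1 hj2 ((hagree j (by omega) hjx).mp hav')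
    · rcases h5 hp with h | h
      · exact Or.inl h
      · by_cases hin : i = nB.length
        · exact Or.inl hin
        · exact Or.inr ((hagree i (by omega) hix).mpr h)

-- goodPr transfers when availability only shrinks away from still-available roots
lemma goodPr_mono (nB : List Int) (cnt cnt' : PySem.Dict Int Int) (pr : List Int)
    (hg : goodPr nB cnt pr)
    (hmono : ∀ j, j < nB.length → availN nB cnt' j → availN nB cnt j)
    (hroot : ∀ i, i < nB.length → availN nB cnt i → availN nB cnt' i ∨ entP pr i ≠ (i : Int)) :
    goodPr nB cnt' pr := by
  obtain ⟨hlen, hinv⟩ := hg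
  refine ⟨hlen, fun i hi => ?_⟩
  obtain ⟨p, h1, h2, h3, h4, h5⟩ := hinv i hi
  refine ⟨p, h1, h2, h3, fun j hj1 hj2 => ?_, fun hp => ?_⟩
  · exact fun hav => h4 j hj1 hj2 (hmono j (by omega) hav)
  · by_cases hin : i = nB.length
    · exact Or.inl hin
    · have hlt : i < nB.length := by omega
      rcases h5 hp with h | h
      · exact Or.inl h
      · rcases hroot i hlt h with h' | h'
        · exact Or.inr h'
        · exact absurd (by rw [h1, hp]) h'

-- proof-side device: the first element > a, removed (specifies one B step)
def removeFirstGT (a : Int) : List Int → Option (List Int)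
  | [] => none
  | y :: t => if a < y then some t else (removeFirstGT a t).map (y :: ·)

-- removeFirstGT returns none iff nothing is > a
lemma removeFirstGT_eq_none_iff (a : Int) (ys : List Int) :
    removeFirstGT a ys = none ↔ ∀ y ∈ ys, y ≤ a := by
  induction ys with
  | nil => simp [removeFirstGT]
  | cons y t ih =>
    simp only [removeFirstGT]
    split
    · simp; intro h; omega
    · simp [ih]; intro _; omega

-- removeFirstGT skips a prefix of elements ≤ a
lemma removeFirstGT_skip (a : Int) (P ys : List Int) (hP : ∀ z ∈ P, z ≤ a) :
    removeFirstGT a (P ++ ys) = (removeFirstGT a ys).map (P ++ ·) := by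
  induction P with
  | nil => simp [Option.map_id']
  | cons z t ih =>
    have hz : ¬ a < z := by have := hP z (by simp); omega
    simp only [List.cons_append, removeFirstGT, if_neg hz,
      ih (fun w hw => hP w (by simp [hw]))]
    cases removeFirstGT a ys <;> simp

lemma mem_expandV (vs : List Int) (cnt : PySem.Dict Int Int) (y : Int) :
    y ∈ expandV vs cnt ↔ y ∈ vs ∧ 1 ≤ cnt.getD y 0 := by
  simp only [expandV, List.mem_flatMap, List.mem_replicate]
  constructor
  · rintro ⟨v, hv, hk, rfl⟩
    exact ⟨hv, by omega⟩
  · rintro ⟨hv, hk⟩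
    exact ⟨y, hv, by omega, rfl⟩

lemma expandV_congr (vs : List Int) (cnt cnt' : PySem.Dict Int Int)
    (h : ∀ v ∈ vs, cnt'.getD v 0 = cnt.getD v 0) : expandV vs cnt' = expandV vs cnt := by
  induction vs with
  | nil => rfl
  | cons v t ih =>
    simp only [expandV, List.flatMap_cons] at *
    rw [h v (by simp), ih (fun w hw => h w (by simp [hw]))]

lemma count_expandV (vs : List Int) (cnt : PySem.Dict Int Int) (hnd : vs.Nodup) (y : Int) :
    (expandV vs cnt).count y = if y ∈ vs then (cnt.getD y 0).toNat else 0 := by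
  induction vs with
  | nil => simp [expandV]
  | cons v t ih =>
    have hnd' : t.Nodup := hnd.of_cons
    simp only [expandV, List.flatMap_cons, List.count_append] at *
    rw [ih hnd']
    by_cases hyv : y = v
    · subst hyv
      have hvt : y ∉ t := by simpa using (List.nodup_cons.mp hnd).1
      simp [hvt]
    · simp [List.count_replicate, hyv, Ne.symm hyv]

lemma pairwise_le_expandV (vs : List Int) (cnt : PySem.Dict Int Int)
    (h : vs.Pairwise (· < ·)) : (expandV vs cnt).Pairwise (· ≤ ·) := by
  induction vs with
  | nil => simp [expandV]
  | cons v t ih =>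
    simp only [expandV, List.flatMap_cons]
    rw [List.pairwise_append]
    refine ⟨List.pairwise_replicate_of_refl, ih h.of_cons, ?_⟩
    · intro x hx y hy
      obtain rfl := List.eq_of_mem_replicate hx
      obtain ⟨hy', _⟩ := (mem_expandV t cnt y).mp hy
      have := (List.pairwise_cons.mp h).1 y hy'
      omega

-- getD at an in-range index is getElem
lemma getD_eq_getElem' (l : List Int) (x : Nat) (h : x < l.length) : l.getD x 0 = l[x] :=
  List.getD_eq_getElem l 0 h

-- no remaining element beats a: every index ≥ c is exhausted, every index < c has value ≤ a
lemma expand_none (nB : List Int) (cnt : PySem.Dict Int Int) (a : Int) (c : Nat)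
    (hlt : ∀ (j : Nat) (hj : j < nB.length), j < c → nB[j] ≤ a)
    (hun : ∀ j, c ≤ j → j < nB.length → ¬ availN nB cnt j) :
    removeFirstGT a (expandV nB cnt) = none := by
  rw [removeFirstGT_eq_none_iff]
  intro y hy
  obtain ⟨hynB, hyav⟩ := (mem_expandV nB cnt y).mp hy
  obtain ⟨j, hj, rfl⟩ := List.mem_iff_getElem.mp hynB
  by_cases hjc : j < c
  · exact hlt j hj hjc
  · exact absurd (by rwa [availN, getD_eq_getElem' nB j hj]) (hun j (by omega) hj)

-- the first remaining element > a is nB[x]; removing it decrements its count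
lemma expand_some (nB : List Int) (cnt : PySem.Dict Int Int) (a : Int) (c x : Nat)
    (hnd : nB.Nodup) (hx : x < nB.length) (hcx : c ≤ x)
    (hlt : ∀ (j : Nat) (hj : j < nB.length), j < c → nB[j] ≤ a)
    (hgt : ∀ (j : Nat) (hj : j < nB.length), c ≤ j → a < nB[j])
    (hun : ∀ j, c ≤ j → j < x → ¬ availN nB cnt j)
    (hav : availN nB cnt x) :
    removeFirstGT a (expandV nB cnt) =
      some (expandV nB (cnt.modify (nB.getD x 0) 0 (· - 1))) := by
  set v := nB.getD x 0 with hv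
  have hvx : v = nB[x] := getD_eq_getElem' nB x hx
  set cnt' := cnt.modify v 0 (· - 1) with hcnt'
  have heq : nB.take x ++ nB[x] :: nB.drop (x + 1) = nB := by
    rw [← List.drop_eq_getElem_cons hx, List.take_append_drop]
  have hnotmem : v ∉ nB.take x ∧ v ∉ nB.drop (x + 1) := by
    have := hnd
    rw [← heq] at this
    rw [List.nodup_append] at this
    obtain ⟨_, h2, h3⟩ := this
    rw [List.nodup_cons] at h2
    constructor
    · intro hmem; exact h3 v hmem nB[x] (List.mem_cons_self ..) hvx
    · intro hmem; rw [hvx] at hmem; exact h2.1 hmem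
  -- split expandV along the decomposition
  have hsplit : ∀ d : PySem.Dict Int Int, expandV nB d =
      expandV (nB.take x) d ++ (List.replicate (d.getD v 0).toNat v ++ expandV (nB.drop (x + 1)) d) := by
    intro d
    calc expandV nB d = expandV (nB.take x ++ nB[x] :: nB.drop (x + 1)) d := by rw [heq]
      _ = _ := by simp only [expandV, List.flatMap_append, List.flatMap_cons, hvx]
  have hP : ∀ z ∈ expandV (nB.take x) cnt, z ≤ a := by
    intro z hz
    obtain ⟨hznB, hzav⟩ := (mem_expandV _ cnt z).mp hz
    obtain ⟨j, hj, hjz⟩ := List.mem_iff_getElem.mp hznB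
    rw [List.length_take] at hj
    have hjx : j < x := by omega
    have hjn : j < nB.length := by omega
    rw [List.getElem_take] at hjz
    by_cases hjc : j < c
    · rw [← hjz]; exact hlt j hjn hjc
    · exfalso
      exact hun j (by omega) hjx (by rwa [availN, getD_eq_getElem' nB j hjn, hjz])
  have hk : 1 ≤ cnt.getD v 0 := hav
  have hkrepl : List.replicate (cnt.getD v 0).toNat v =
      v :: List.replicate ((cnt.getD v 0).toNat - 1) v := by
    have h1 : (cnt.getD v 0).toNat = ((cnt.getD v 0).toNat - 1) + 1 := by omega
    conv_lhs => rw [h1, List.replicate_succ]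
  have hva : a < v := by rw [hvx]; exact hgt x hx hcx
  rw [hsplit cnt, removeFirstGT_skip a _ _ hP, hkrepl]
  simp only [List.cons_append, removeFirstGT, if_pos hva, Option.map_some]
  congr 1
  rw [hsplit cnt']
  have hPc : expandV (nB.take x) cnt' = expandV (nB.take x) cnt := by
    refine expandV_congr _ cnt cnt' (fun w hw => ?_)
    exact PySem.Dict.getD_modify_of_ne cnt 0 _ (fun hwv => hnotmem.1 (hwv ▸ hw))
  have hRc : expandV (nB.drop (x + 1)) cnt' = expandV (nB.drop (x + 1)) cnt := by
    refine expandV_congr _ cnt cnt' (fun w hw => ?_)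
    exact PySem.Dict.getD_modify_of_ne cnt 0 _ (fun hwv => hnotmem.2 (hwv ▸ hw))
  have hkc : (cnt'.getD v 0).toNat = (cnt.getD v 0).toNat - 1 := by
    rw [hcnt', PySem.Dict.getD_modify_self]
    omega
  rw [hPc, hRc, hkc]

-- on a sorted list, B's bisect-and-delete step removes exactly the first element > a
lemma stepB_eq_removeFirstGT (rem : List Int) (sc : Int) (a : Int)
    (hs : rem.Pairwise (· ≤ ·)) :
    stepB (rem, sc) a = match removeFirstGT a rem with
      | some r => (r, sc + 1)
      | none => (rem, sc) := by
  obtain ⟨hk1, hk2, hk3⟩ := PySem.List.bisectRight_spec rem a hs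
  set k := PySem.List.bisectRight rem a with hkdef
  by_cases hk : k < rem.length
  · have heq : rem.take k ++ rem[k] :: rem.drop (k + 1) = rem := by
      rw [← List.drop_eq_getElem_cons hk, List.take_append_drop]
    have hP : ∀ z ∈ rem.take k, z ≤ a := by
      intro z hz
      obtain ⟨j, hj, hjz⟩ := List.mem_iff_getElem.mp hz
      rw [List.length_take] at hj
      rw [List.getElem_take] at hjz
      rw [← hjz]
      exact hk2 j (by omega) (by omega)
    have hsome : removeFirstGT a rem = some (rem.take k ++ rem.drop (k + 1)) := by
      conv_lhs => rw [← heq]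
      rw [removeFirstGT_skip a _ _ hP]
      simp only [removeFirstGT, if_pos (hk3 k hk (le_refl k)), Option.map_some]
    rw [hsome]
    simp only [stepB, ← hkdef, if_pos hk]
    rw [List.eraseIdx_eq_take_drop_succ]
  · have hnone : removeFirstGT a rem = none := by
      rw [removeFirstGT_eq_none_iff]
      intro y hy
      obtain ⟨j, hj, rfl⟩ := List.mem_iff_getElem.mp hy
      exact hk2 j hj (by omega)
    rw [hnone]
    simp only [stepB, ← hkdef, if_neg hk]

-- one step of A's loop and one step of B's loop stay in lock-step
lemma step_sim (nB : List Int) (b : Int)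
    (hnd : nB.Pairwise (· < ·))
    (hmax : ∀ v ∈ nB, v ≤ b)
    (pr : List Int) (cnt : PySem.Dict Int Int) (sc : Int) (a : Int)
    (hg : goodPr nB cnt pr) :
    ∃ pr' cnt' sc', loopA b nB (pr, cnt, sc) a = (pr', cnt', sc') ∧
      stepB (expandV nB cnt, sc) a = (expandV nB cnt', sc') ∧ goodPr nB cnt' pr' := by
  have hnd' : nB.Nodup := hnd.imp (fun h => ne_of_lt h)
  by_cases ha : a ≤ b
  · have hble : nB.Pairwise (· ≤ ·) := hnd.imp (fun h => le_of_lt h)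
    obtain ⟨hc1, hc2, hc3⟩ := PySem.List.bisectRight_spec nB a hble
    set c := PySem.List.bisectRight nB a with hcdef
    have hfuel : nB.length - c < pr.length := by rw [hg.1]; omega
    have hf := findSpec nB cnt pr.length pr c hg hc1 hfuel
    set x := firstAvail nB cnt c with hxdef
    have hcx : c ≤ x := by simp [hxdef, firstAvail]
    have hxn : x ≤ nB.length := firstAvail_le nB cnt c hc1
    have hun : ∀ j, c ≤ j → j < x → ¬ availN nB cnt j := firstAvail_spec1 nB cnt c
    by_cases hxx : x = nB.length
    · -- no available element > a remains: both sides skip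
      refine ⟨(pyFindA pr.length pr (c : Int)).1, cnt, sc, ?_, ?_, hf.1⟩
      · simp only [loopA, if_pos ha, ← hcdef, hf.2.2]
        rw [if_pos (by exact_mod_cast hxx)]
      · have hnone : removeFirstGT a (expandV nB cnt) = none := by
          refine expand_none nB cnt a c (fun j hj hjc => hc2 j hj hjc) (fun j hj1 hj2 => ?_)
          exact hun j hj1 (by omega)
        rw [stepB_eq_removeFirstGT _ _ _ (pairwise_le_expandV nB cnt hnd), hnone]
    · -- nB[x] is the smallest remaining element > a
      have hx' : x < nB.length := by omega
      have hav : availN nB cnt x := firstAvail_spec2 nB cnt c (by omega)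
      have hvget : PySem.List.pyGetD nB (x : Int) 0 = nB.getD x 0 :=
        PySem.List.pyGetD_natCast nB x 0
      set v := nB.getD x 0 with hvdef
      have hvx : v = nB[x] := getD_eq_getElem' nB x hx'
      have hav' : 1 ≤ cnt.getD v 0 := hav
      set cnt1 := cnt.modify v 0 (· - 1) with hcnt1
      have hsome : removeFirstGT a (expandV nB cnt) = some (expandV nB cnt1) :=
        expand_some nB cnt a c x hnd' hx' hcx hc2 hc3 hun hav
      have hBstep : stepB (expandV nB cnt, sc) a = (expandV nB cnt1, sc + 1) := by
        rw [stepB_eq_removeFirstGT _ _ _ (pairwise_le_expandV nB cnt hnd), hsome]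
      have hab : a ≠ b := by
        have h1 : a < nB[x] := hc3 x hx' hcx
        have h2 : nB[x] ≤ b := hmax nB[x] (nB.getElem_mem hx')
        omega
      -- how cnt1 relates to cnt
      have hgetD1 : cnt1.getD v 0 = cnt.getD v 0 - 1 := by
        rw [hcnt1, PySem.Dict.getD_modify_self]
      have hgetDne : ∀ w, w ≠ v → cnt1.getD w 0 = cnt.getD w 0 := by
        intro w hw
        rw [hcnt1]
        exact PySem.Dict.getD_modify_of_ne cnt 0 _ hw
      have hvalne : ∀ j, j < nB.length → j ≠ x → nB.getD j 0 ≠ v := by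
        intro j hj hjx hcon
        rw [getD_eq_getElem' nB j hj, hvx] at hcon
        exact hjx (hnd'.getElem_inj_iff.mp hcon)
      have hagree : ∀ j, j < nB.length → j ≠ x → (availN nB cnt1 j ↔ availN nB cnt j) := by
        intro j hj hjx
        unfold availN
        rw [hgetDne _ (hvalne j hj hjx)]
      by_cases hz : cnt1.getD v 0 = 0
      · -- the value is exhausted: A unions x with x+1
        refine ⟨pyUnionA (pyFindA pr.length pr (c : Int)).1 (x : Int) ((x : Int) + 1),
          cnt1, sc + 1, ?_, hBstep, ?_⟩
        · simp only [loopA, if_pos ha, ← hcdef, hf.2.2]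
          rw [if_neg (by exact_mod_cast hxx), hvget, if_pos hav', ← hcnt1,
            if_pos ⟨hz, hab⟩]
        · refine unionSpec nB cnt cnt1 _ x hf.1 hx' hav hagree ?_
          unfold availN
          rw [← hvdef, hz]
          omega
      · -- still copies of the value left: the invariant transfers directly
        refine ⟨(pyFindA pr.length pr (c : Int)).1, cnt1, sc + 1, ?_, hBstep, ?_⟩
        · simp only [loopA, if_pos ha, ← hcdef, hf.2.2]
          rw [if_neg (by exact_mod_cast hxx), hvget, if_pos hav', ← hcnt1,
            if_neg (by rintro ⟨h1, _⟩; exact hz h1)]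
        · refine goodPr_mono nB cnt cnt1 _ hf.1 (fun j hj hav1 => ?_) (fun i hi havi => ?_)
          · unfold availN at hav1 ⊢
            by_cases hjv : nB.getD j 0 = v
            · rw [hjv] at hav1 ⊢; omega
            · rwa [hgetDne _ hjv] at hav1
          · left
            unfold availN at havi ⊢
            by_cases hiv : nB.getD i 0 = v
            · rw [hiv] at havi ⊢; omega
            · rwa [hgetDne _ hiv]
  · -- a beats nothing (a > max B): both sides skip
    refine ⟨pr, cnt, sc, by simp only [loopA, if_neg ha], ?_, hg⟩
    have hnone : removeFirstGT a (expandV nB cnt) = none := by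
      refine expand_none nB cnt a nB.length (fun j hj _ => ?_) (fun j hj1 hj2 => by omega)
      have := hmax nB[j] (nB.getElem_mem hj)
      omega
    rw [stepB_eq_removeFirstGT _ _ _ (pairwise_le_expandV nB cnt hnd), hnone]

-- the two folds agree on the score component
lemma loop_eq (nB : List Int) (b : Int)
    (hnd : nB.Pairwise (· < ·))
    (hmax : ∀ v ∈ nB, v ≤ b) :
    ∀ (As : List Int) (pr : List Int) (cnt : PySem.Dict Int Int) (sc : Int),
    goodPr nB cnt pr →
    (As.foldl (loopA b nB) (pr, cnt, sc)).2.2 =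
    (As.foldl stepB (expandV nB cnt, sc)).2 := by
  intro As
  induction As with
  | nil => intro pr cnt sc hg; rfl
  | cons a As ih =>
    intro pr cnt sc hg
    obtain ⟨pr', cnt', sc', hA, hB, hg'⟩ := step_sim nB b hnd hmax pr cnt sc a hg
    rw [List.foldl_cons, List.foldl_cons, hA, hB]
    exact ih pr' cnt' sc' hg'

-- the initial parent list satisfies the invariant
lemma goodPr_init (B : List Int) (nB : List Int)
    (hmem : ∀ v, v ∈ nB → v ∈ B) :
    goodPr nB (PySem.Dict.counter B) (PySem.List.pyRange 0 ((nB.length : Int) + 1) 1) := by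
  have hlen : (PySem.List.pyRange 0 ((nB.length : Int) + 1) 1).length = nB.length + 1 := by
    rw [PySem.List.length_pyRange_one]
    omega
  refine ⟨hlen, fun i hi => ?_⟩
  have hient : entP (PySem.List.pyRange 0 ((nB.length : Int) + 1) 1) i = (i : Int) := by
    unfold entP
    rw [PySem.List.pyGetD_natCast, getD_eq_getElem' _ i (by omega : i < _),
      PySem.List.getElem_pyRange_one]
    omega
  refine ⟨i, hient, le_refl i, hi, fun j hj1 hj2 => by omega, fun _ => ?_⟩
  by_cases hin : i = nB.length
  · exact Or.inl hin
  · right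
    unfold availN
    have hmemi : nB.getD i 0 ∈ nB := by
      rw [getD_eq_getElem' nB i (by omega)]
      exact nB.getElem_mem (by omega)
    have : 0 < B.count (nB.getD i 0) := List.count_pos_iff.mpr (hmem _ hmemi)
    rw [PySem.Dict.getD_counter]
    omega

-- sorted(B) is the initial remaining multiset
lemma sorted_eq_expandV (B : List Int) :
    PySem.List.sorted B (fun y => y) =
      expandV (PySem.List.sorted (PySem.Set.ofList B) (fun y => y)) (PySem.Dict.counter B) := by
  set nB := PySem.List.sorted (PySem.Set.ofList B) (fun y => y) with hnB
  have hnd : nB.Pairwise (· < ·) := PySem.List.sorted_ofList_pairwise_lt B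
  have hnd' : nB.Nodup := hnd.imp (fun h => ne_of_lt h)
  have hmem : ∀ v, v ∈ nB ↔ v ∈ B := by
    intro v
    rw [hnB, PySem.List.mem_sorted, PySem.Set.mem_ofList]
  refine PySem.List.sorted_id_eq_of_perm_of_pairwise B _ ?_ ?_
  · rw [List.perm_iff_count]
    intro y
    rw [count_expandV nB (PySem.Dict.counter B) hnd' y]
    by_cases hy : y ∈ nB
    · rw [if_pos hy, PySem.Dict.getD_counter]
      simp
    · rw [if_neg hy]
      have : y ∉ B := fun hc => hy ((hmem y).mpr hc)
      simp [List.count_eq_zero_of_not_mem this]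
  · exact pairwise_le_expandV nB _ hnd

-- ===== VERDICT (by name: the statement is the Claim_ definition above) =====
theorem solution_spec : Claim_equal_solution := by
  intro A B _ hPre
  unfold Spec_solution solution solution_alt
  obtain ⟨bm, hbm⟩ : ∃ bm, PySem.List.max? B (fun y => y) = some bm := by
    cases hmb : PySem.List.max? B (fun y => y) with
    | none => exact absurd ((PySem.List.max?_eq_none_iff B _).mp hmb) hPre
    | some m => exact ⟨m, rfl⟩
  rw [hbm]
  set nB := PySem.List.sorted (PySem.Set.ofList B) (fun y => y) with hnB
  have hnd : nB.Pairwise (· < ·) := PySem.List.sorted_ofList_pairwise_lt B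
  have hmem : ∀ v, v ∈ nB ↔ v ∈ B := by
    intro v
    rw [hnB, PySem.List.mem_sorted, PySem.Set.mem_ofList]
  have hmax : ∀ v ∈ nB, v ≤ bm := fun v hv =>
    PySem.List.max?_isMax hbm v ((hmem v).mp hv)
  rw [sorted_eq_expandV B, ← hnB]
  show (List.foldl (loopA bm nB)
      (PySem.List.pyRange 0 ((nB.length : Int) + 1) 1, PySem.Dict.counter B, 0) A).2.2 =
    (List.foldl stepB (expandV nB (PySem.Dict.counter B), 0) A).2
  exact loop_eq nB bm hnd hmax A _ _ 0 (goodPr_init B nB (fun v hv => (hmem v).mp hv))
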